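-- pv_equiv track=rewrite | github.com/abdulmunimjemal/Competititve-Programming | codeforce/cat.py | is_it_cat
-- ===== SOURCE A (Python) =====
-- def is_it_cat(s: str, n: int):
--     s = s.lower()
--
--     if not s or s[0] != 'm' or s[-1] != 'w':
--         return "NO"
--
--     last = s[0]
--     data = {'m': 'e',
--             'e': 'o',
--             'o': 'w',
--             'w': ''}  # "last:next"
--
--     for i in range(1,len(s)):
--         if s[i] == last:
--             continue
--         else:
--             if s[i] == data[last]:
--                 last = s[i]
--                 continue
--             else:
--                 return 'NO'
--     return "YES"
-- ===== SOURCE B (Python) =====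
-- def is_it_cat(s: str, n: int):
--     # run-length compress to the list of consecutive-distinct characters,
--     # then one constant comparison
--     keys = []
--     for c in s.lower():
--         if not keys or keys[-1] != c:
--             keys.append(c)
--     return "YES" if keys == ['m', 'e', 'o', 'w'] else "NO"
-- ===== Notes on version B (the rewrite author's own statement) =====
-- stated objective: simpler
-- what changed: B run-length-compresses the lowered string to its list of consecutive-distinct characters and compares it once against ['m','e','o','w'], instead of A's head/tail guards plus an expected-next-character state machine driven by a transition dict.
import Mathlib
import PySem

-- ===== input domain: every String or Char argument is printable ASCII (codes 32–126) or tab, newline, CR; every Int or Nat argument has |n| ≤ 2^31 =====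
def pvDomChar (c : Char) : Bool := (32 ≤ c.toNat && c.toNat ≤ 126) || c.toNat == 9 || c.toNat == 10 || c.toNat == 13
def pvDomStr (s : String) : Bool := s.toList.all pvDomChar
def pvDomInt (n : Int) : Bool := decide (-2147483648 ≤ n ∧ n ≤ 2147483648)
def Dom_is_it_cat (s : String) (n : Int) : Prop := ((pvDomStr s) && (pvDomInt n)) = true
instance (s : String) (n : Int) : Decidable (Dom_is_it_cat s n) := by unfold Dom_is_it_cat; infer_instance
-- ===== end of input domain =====

-- B replaces A's expected-next-character state machine (transition dict + first/last guards)
-- by run-length-compressing the lowered string and comparing once with ['m','e','o','w']; objective: simpler.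


-- ===== PORT A =====
-- the transition dict {'m':'e','e':'o','o':'w','w':''}
def catData : PySem.Dict Char String :=
  PySem.Dict.ofList [('m', "e"), ('e', "o"), ('o', "w"), ('w', "")]

-- the for-loop over range(1, len(s)): recursion over the tail characters, carrying `last`
-- (data[last] never misses — last is always one of the four keys — so getD is exact here)
def catLoop (last : Char) : List Char → String
  | [] => "YES"
  | c :: rest =>
    if c = last then catLoop last rest
    else if String.ofList [c] = PySem.Dict.getD catData last "" then catLoop c rest
    else "NO"

def is_it_cat (s : String) (_n : Int) : String :=
  match (PySem.Str.lower s).toList with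
  | [] => "NO"
  | c :: rest =>
    if PySem.List.pyGet? (c :: rest) 0 ≠ some 'm' ∨
       PySem.List.pyGet? (c :: rest) (-1) ≠ some 'w' then "NO"
    else catLoop c rest

-- ===== PORT B =====
-- the accumulator loop of Source B: append c when keys is empty or its last element differs
def catStep (ks : List Char) (c : Char) : List Char :=
  if ks = [] ∨ ks.getLast? ≠ some c then ks ++ [c] else ks

def is_it_cat_alt (s : String) (_n : Int) : String :=
  if (PySem.Str.lower s).toList.foldl catStep [] = ['m', 'e', 'o', 'w'] then "YES" else "NO"

-- ===== PRECONDITION & SPEC =====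
def Spec_is_it_cat (s : String) (n : Int) (out : String) : Prop := out = is_it_cat_alt s n
instance (s : String) (n : Int) (out : String) : Decidable (Spec_is_it_cat s n out) := by unfold Spec_is_it_cat; infer_instance

-- ===== CLAIM (what is proved, stated in full; the proofs are below) =====
def Claim_equal_is_it_cat : Prop := ∀ (s : String) (n : Int), Dom_is_it_cat s n → Spec_is_it_cat s n (is_it_cat s n)

-- ===== LEMMAS AND PROOFS =====

-- recursive form of B's run-length compression, with current last char x
def dd (x : Char) : List Char → List Char
  | [] => [x]
  | c :: r => if c = x then dd x r else x :: dd c r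

theorem dd_ne_nil (x : Char) (l : List Char) : dd x l ≠ [] := by
  induction l generalizing x with
  | nil => simp [dd]
  | cons c r ih => by_cases h : c = x <;> simp [dd, h, ih]

theorem dd_head (x : Char) (l : List Char) : ∃ t, dd x l = x :: t := by
  induction l generalizing x with
  | nil => exact ⟨[], rfl⟩
  | cons c r ih =>
    by_cases h : c = x
    · simpa [dd, h] using ih x
    · exact ⟨dd c r, by simp [dd, h]⟩

theorem dd_getLast? (x : Char) (l : List Char) : (dd x l).getLast? = (x :: l).getLast? := by
  induction l generalizing x with
  | nil => rfl
  | cons c r ih =>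
    by_cases h : c = x
    · subst h
      rw [show dd c (c :: r) = dd c r by simp [dd], ih c, List.getLast?_cons_cons]
    · rw [show dd x (c :: r) = x :: dd c r by simp [dd, h], List.getLast?_cons_cons]
      obtain ⟨t, ht⟩ := dd_head c r
      rw [← ih c, ht, List.getLast?_cons_cons, ← ht, ih c]

-- B's foldl equals the recursive compression
theorem foldl_catStep (l : List Char) : ∀ (a : List Char) (x : Char),
    l.foldl catStep (a ++ [x]) = a ++ dd x l := by
  induction l with
  | nil => intro a x; simp [dd]
  | cons c r ih =>
    intro a x
    by_cases h : c = x
    · have hcs : catStep (a ++ [x]) c = a ++ [x] := by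
        simp [catStep, List.getLast?_append, h]
      rw [List.foldl_cons, hcs, ih a x]
      simp [dd, h]
    · have hcs : catStep (a ++ [x]) c = (a ++ [x]) ++ [c] := by
        simp [catStep, List.getLast?_append]
        exact fun hx => h hx.symm
      rw [List.foldl_cons, hcs, ih (a ++ [x]) c, List.append_assoc]
      simp [dd, h]

theorem keys_eq (c : Char) (r : List Char) :
    (c :: r).foldl catStep [] = dd c r := by
  have h : catStep [] c = [] ++ [c] := by simp [catStep]
  rw [List.foldl_cons, h]
  simpa using foldl_catStep r [] c

def chain : Char → List Char
  | 'm' => ['m', 'e', 'o', 'w']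
  | 'e' => ['e', 'o', 'w']
  | 'o' => ['o', 'w']
  | _ => ['w']

theorem ofList_singleton_eq (c d : Char) : (String.ofList [c] = String.ofList [d]) ↔ c = d := by
  constructor
  · intro h
    have := congrArg String.toList h
    simpa using this
  · intro h; subst h; rfl

theorem ofList_singleton_ne_empty (c : Char) : ¬ (String.ofList [c] = "") := by
  intro h
  have := congrArg String.toList h
  simp at this

-- A's loop says YES exactly when the compression (from `last`) is a prefix of the remaining chain
theorem catLoop_eq (l : List Char) : ∀ last, last ∈ (['m', 'e', 'o', 'w'] : List Char) →
    catLoop last l = if dd last l <+: chain last then "YES" else "NO" := by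
  induction l with
  | nil =>
    intro last hl
    fin_cases hl <;> simp [catLoop, dd, chain]
  | cons c r ih =>
    intro last hl
    by_cases hc : c = last
    · rw [show catLoop last (c :: r) = catLoop last r by rw [catLoop]; simp [hc],
        show dd last (c :: r) = dd last r by rw [dd]; simp [hc]]
      exact ih last hl
    · have hloop : catLoop last (c :: r) =
          if String.ofList [c] = PySem.Dict.getD catData last "" then catLoop c r else "NO" := by
        rw [catLoop]; simp [hc]
      have hdd : dd last (c :: r) = last :: dd c r := by rw [dd]; simp [hc]
      obtain ⟨t, ht⟩ := dd_head c r
      fin_cases hl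
      · -- last = 'm'
        by_cases he : c = 'e'
        · subst he
          have hiff : (dd 'm' ('e' :: r) <+: chain 'm') ↔ (dd 'e' r <+: chain 'e') := by
            rw [hdd, show chain 'm' = 'm' :: chain 'e' from rfl, List.cons_prefix_cons]; simp
          rw [hloop, show PySem.Dict.getD catData 'm' "" = "e" from rfl, if_pos rfl,
            ih 'e' (by decide)]
          exact (if_congr hiff rfl rfl).symm
        · have hn : ¬ (dd 'm' (c :: r) <+: chain 'm') := by
            rw [hdd, show chain 'm' = 'm' :: chain 'e' from rfl, List.cons_prefix_cons]
            rintro ⟨-, hp⟩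
            rw [ht, show chain 'e' = 'e' :: ['o', 'w'] from rfl, List.cons_prefix_cons] at hp
            exact he hp.1
          rw [hloop, show PySem.Dict.getD catData 'm' "" = "e" from rfl,
            if_neg (fun h => he ((ofList_singleton_eq c 'e').mp h)), if_neg hn]
      · -- last = 'e'
        by_cases he : c = 'o'
        · subst he
          have hiff : (dd 'e' ('o' :: r) <+: chain 'e') ↔ (dd 'o' r <+: chain 'o') := by
            rw [hdd, show chain 'e' = 'e' :: chain 'o' from rfl, List.cons_prefix_cons]; simp
          rw [hloop, show PySem.Dict.getD catData 'e' "" = "o" from rfl, if_pos rfl,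
            ih 'o' (by decide)]
          exact (if_congr hiff rfl rfl).symm
        · have hn : ¬ (dd 'e' (c :: r) <+: chain 'e') := by
            rw [hdd, show chain 'e' = 'e' :: chain 'o' from rfl, List.cons_prefix_cons]
            rintro ⟨-, hp⟩
            rw [ht, show chain 'o' = 'o' :: ['w'] from rfl, List.cons_prefix_cons] at hp
            exact he hp.1
          rw [hloop, show PySem.Dict.getD catData 'e' "" = "o" from rfl,
            if_neg (fun h => he ((ofList_singleton_eq c 'o').mp h)), if_neg hn]
      · -- last = 'o'
        by_cases he : c = 'w'
        · subst he
          have hiff : (dd 'o' ('w' :: r) <+: chain 'o') ↔ (dd 'w' r <+: chain 'w') := by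
            rw [hdd, show chain 'o' = 'o' :: chain 'w' from rfl, List.cons_prefix_cons]; simp
          rw [hloop, show PySem.Dict.getD catData 'o' "" = "w" from rfl, if_pos rfl,
            ih 'w' (by decide)]
          exact (if_congr hiff rfl rfl).symm
        · have hn : ¬ (dd 'o' (c :: r) <+: chain 'o') := by
            rw [hdd, show chain 'o' = 'o' :: chain 'w' from rfl, List.cons_prefix_cons]
            rintro ⟨-, hp⟩
            rw [ht, show chain 'w' = 'w' :: ([] : List Char) from rfl,
              List.cons_prefix_cons] at hp
            exact he hp.1
          rw [hloop, show PySem.Dict.getD catData 'o' "" = "w" from rfl,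
            if_neg (fun h => he ((ofList_singleton_eq c 'w').mp h)), if_neg hn]
      · -- last = 'w'
        have hn : ¬ (dd 'w' (c :: r) <+: chain 'w') := by
          rw [hdd, show chain 'w' = 'w' :: ([] : List Char) from rfl, List.cons_prefix_cons]
          rintro ⟨-, hp⟩
          exact dd_ne_nil c r (List.prefix_nil.mp hp)
        rw [hloop, show PySem.Dict.getD catData 'w' "" = "" from rfl,
          if_neg (ofList_singleton_ne_empty c), if_neg hn]

-- the only prefix of ['m','e','o','w'] ending in 'w' is the whole chain
theorem prefix_full (p : List Char) (hp : p <+: ['m', 'e', 'o', 'w'])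
    (hl : p.getLast? = some 'w') : p = ['m', 'e', 'o', 'w'] := by
  obtain ⟨t, ht⟩ := hp
  rcases p with _ | ⟨a, _ | ⟨b, _ | ⟨c, _ | ⟨d, _ | ⟨e, p⟩⟩⟩⟩⟩ <;> simp_all

-- ===== VERDICT (by name: the statement is the Claim_ definition above) =====
theorem is_it_cat_spec : Claim_equal_is_it_cat := by
  intro s n _
  unfold Spec_is_it_cat is_it_cat is_it_cat_alt
  cases hl : (PySem.Str.lower s).toList with
  | nil => simp
  | cons c rest =>
    rw [keys_eq]
    show (if PySem.List.pyGet? (c :: rest) 0 ≠ some 'm' ∨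
        PySem.List.pyGet? (c :: rest) (-1) ≠ some 'w' then "NO" else catLoop c rest) =
      if dd c rest = ['m', 'e', 'o', 'w'] then "YES" else "NO"
    rw [PySem.List.pyGet?_zero_cons, PySem.List.pyGet?_neg_one]
    by_cases hcm : c = 'm'
    · by_cases hw : (c :: rest).getLast? = some 'w'
      · subst hcm
        rw [if_neg (by simp [hw]), catLoop_eq rest 'm' (by decide)]
        refine if_congr ?_ rfl rfl
        constructor
        · intro hp
          refine prefix_full _ (by rwa [show chain 'm' = ['m','e','o','w'] from rfl] at hp) ?_
          rw [dd_getLast?]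
          exact hw
        · intro he; rw [he]; exact List.prefix_refl _
      · rw [if_pos (Or.inr (by simpa using hw)), if_neg]
        intro he
        apply hw
        rw [← dd_getLast? c rest, he]
        rfl
    · rw [if_pos (Or.inl (by simpa using hcm)), if_neg]
      intro he
      obtain ⟨t, ht⟩ := dd_head c rest
      rw [ht] at he
      exact hcm (List.cons.injEq .. ▸ he).1
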